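-- pv_equiv track=rewrite | github.com/SHJoon/Algorithms | arrays/7_skyline_heights.py | skyline_heights
-- ===== SOURCE A (Python) =====
-- def skyline_heights(lst):
--     highest_floor = lst[0]
--     visible = [highest_floor]
--
--     for floor in lst:
--         if floor > highest_floor:
--             visible.append(floor)
--             highest_floor = floor
--
--     return visible
-- ===== SOURCE B (Python) =====
-- def skyline_heights(lst):
--     # Two-pass decomposition: build the running-maximum table, then
--     # emit entries where the running max strictly increased.
--     runmax = [lst[0]]
--     m = lst[0]
--     for x in lst[1:]:
--         m = max(m, x)
--         runmax.append(m)
--     res = [runmax[0]]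
--     for prev, cur in zip(runmax, runmax[1:]):
--         if cur != prev:
--             res.append(cur)
--     return res
-- ===== Notes on version B (the rewrite author's own statement) =====
-- stated objective: alternative
-- what changed: Replaces the fused track-and-append loop by a two-pass decomposition: first build a running-maximum table, then scan adjacent table entries and emit each strict increase.
import Mathlib
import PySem

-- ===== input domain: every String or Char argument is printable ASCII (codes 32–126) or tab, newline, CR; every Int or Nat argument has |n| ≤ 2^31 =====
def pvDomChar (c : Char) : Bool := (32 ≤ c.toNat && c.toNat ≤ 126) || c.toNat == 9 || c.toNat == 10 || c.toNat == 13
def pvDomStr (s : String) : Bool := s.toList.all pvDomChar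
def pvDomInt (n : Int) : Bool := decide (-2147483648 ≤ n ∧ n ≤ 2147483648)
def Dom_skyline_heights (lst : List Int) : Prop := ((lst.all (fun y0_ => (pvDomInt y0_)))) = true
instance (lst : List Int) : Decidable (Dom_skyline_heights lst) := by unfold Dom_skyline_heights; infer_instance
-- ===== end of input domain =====

-- B replaces A's fused track-and-append loop with a running-maximum table built first,
-- then a second pass emitting strict increases of that table (alternative decomposition, same cost).


-- ===== PORT A =====
-- lst[0] raises IndexError on []; Pre_ excludes the empty list, headD's default is never used under Pre_.
def skyline_heights (lst : List Int) : List Int :=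
  let h := lst.headD 0
  (lst.foldl (fun (st : List Int × Int) floor =>
      if floor > st.2 then (st.1 ++ [floor], floor) else st) ([h], h)).1

-- ===== PORT B =====
-- first pass: running-maximum table (the pair tracks the list and its last element m);
-- second pass: zip adjacent table entries, keep strict increases.
def skyline_heights_alt (lst : List Int) : List Int :=
  let h := lst.headD 0
  let rm := (lst.tail.foldl (fun (st : List Int × Int) x =>
      (st.1 ++ [max st.2 x], max st.2 x)) ([h], h)).1
  (rm.zip rm.tail).foldl
    (fun res p => if p.2 ≠ p.1 then res ++ [p.2] else res) [rm.headD 0]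

-- ===== PRECONDITION & SPEC =====
-- A raises IndexError on the empty list (lst[0]); B does too, so [] is excluded.
def Pre_skyline_heights (lst : List Int) : Prop := lst ≠ []
instance (lst : List Int) : Decidable (Pre_skyline_heights lst) := by unfold Pre_skyline_heights; infer_instance
def pvWitness_skyline_heights : List Int := [1, 3, 2, 5]

def Spec_skyline_heights (lst : List Int) (out : List Int) : Prop := out = skyline_heights_alt lst
instance (lst : List Int) (out : List Int) : Decidable (Spec_skyline_heights lst out) := by unfold Spec_skyline_heights; infer_instance

-- ===== CLAIM (what is proved, stated in full; the proofs are below) =====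
def Claim_equal_skyline_heights : Prop := ∀ (lst : List Int), Dom_skyline_heights lst → Pre_skyline_heights lst → Spec_skyline_heights lst (skyline_heights lst)

-- ===== LEMMAS AND PROOFS =====

-- A's loop body, as structural recursion on the remaining floors given the current max m.
def fA (m : Int) : List Int → List Int
  | [] => []
  | x :: xs => if x > m then x :: fA x xs else fA m xs

-- running-maximum scan with current max m
def scanM (m : Int) : List Int → List Int
  | [] => []
  | x :: xs => max m x :: scanM (max m x) xs

-- B's second pass, as recursion on the table tail given the previous entry.
def fB (prev : Int) : List Int → List Int
  | [] => []
  | x :: xs => if x ≠ prev then x :: fB x xs else fB x xs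

theorem foldlA_eq (xs : List Int) : ∀ (vis : List Int) (m : Int),
    xs.foldl (fun (st : List Int × Int) floor =>
      if floor > st.2 then (st.1 ++ [floor], floor) else st) (vis, m)
    = (vis ++ fA m xs, xs.foldl (fun a x => if x > a then x else a) m) := by
  induction xs with
  | nil => intro vis m; simp [fA]
  | cons x xs ih =>
    intro vis m
    by_cases h : x > m
    · simp [List.foldl_cons, h, fA, ih]
    · simp [List.foldl_cons, h, fA, ih]

theorem foldlB_eq (xs : List Int) : ∀ (acc : List Int) (m : Int),
    xs.foldl (fun (st : List Int × Int) x =>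
      (st.1 ++ [max st.2 x], max st.2 x)) (acc, m)
    = (acc ++ scanM m xs, xs.foldl max m) := by
  induction xs with
  | nil => intro acc m; simp [scanM]
  | cons x xs ih => intro acc m; simp [List.foldl_cons, scanM, ih]

theorem foldl_zip_eq (l : List Int) : ∀ (prev : Int) (res : List Int),
    ((prev :: l).zip l).foldl
      (fun res p => if p.2 ≠ p.1 then res ++ [p.2] else res) res
    = res ++ fB prev l := by
  induction l with
  | nil => intro prev res; simp [fB]
  | cons x xs ih =>
    intro prev res
    by_cases h : x ≠ prev
    · simp only [List.zip_cons_cons, List.foldl_cons, if_pos h, ih, fB]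
      simp [h]
    · simp only [List.zip_cons_cons, List.foldl_cons, if_neg h, ih, fB]

theorem fB_scanM (xs : List Int) : ∀ (m : Int), fB m (scanM m xs) = fA m xs := by
  induction xs with
  | nil => intro m; simp [scanM, fA, fB]
  | cons x xs ih =>
    intro m
    by_cases h : x > m
    · have hmax : max m x = x := max_eq_right (le_of_lt h)
      simp [scanM, fB, fA, hmax, h.ne', h, ih]
    · have hmax : max m x = m := max_eq_left (le_of_not_gt h)
      simp [scanM, fB, fA, hmax, h, ih]

theorem fA_self (m : Int) (xs : List Int) : fA m (m :: xs) = fA m xs := by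
  simp [fA]

-- ===== VERDICT (by name: the statement is the Claim_ definition above) =====
theorem skyline_heights_spec : Claim_equal_skyline_heights := by
  intro lst _ hpre
  match lst with
  | [] => exact absurd rfl hpre
  | h :: t =>
    show skyline_heights (h :: t) = skyline_heights_alt (h :: t)
    unfold skyline_heights skyline_heights_alt
    simp only [List.headD_cons, List.tail_cons]
    rw [foldlA_eq, foldlB_eq]
    simp only [fA_self]
    have hl : [h] ++ scanM h t = h :: scanM h t := by simp
    rw [hl]
    simp only [List.tail_cons, List.headD_cons]
    rw [foldl_zip_eq, fB_scanM]
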